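-- pv_equiv track=rewrite | github.com/MicheleCattaneo/USI_Algo_Bible | DynamicProgramming/SubSetSumProblem.py | partialSums
-- ===== SOURCE A (Python) =====
-- def partialSums(S):
--     '''
--     Compute for each position i in the array the sum of positive integers and the sum of negative integers
--     that I can still obtain from i+1 to the end of the array
--     :param S: the array to check
--     :return: the two arrays with the partial sums
--     '''
--     resPos = [0]*len(S)
--     resNeg = [0]*len(S)
--     i = len(S)-1
--     resPos[i] = S[i] if S[i] > 0 else 0
--     resNeg[i] = S[i] if S[i] < 0 else 0
--     partialPosSum = resPos[i] # sum of positives so far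
--     partialNegSum = resNeg[i] # sum of negatives so far
--     i -= 1
--     while i >= 0:
--         curr = S[i]
--         if curr > 0: # if curr element is positive, add to positives
--             resPos[i] = partialPosSum + curr
--             resNeg[i] = partialNegSum
--             partialPosSum += curr
--         else: # otherwise add to neatives
--             resPos[i] = partialPosSum
--             resNeg[i] = partialNegSum + curr
--             partialNegSum += curr
--         i -= 1
--     return resPos, resNeg
-- ===== SOURCE B (Python) =====
-- def partialSums(S):
--     '''Suffix sums (index i included) of positive and of negative elements,
--     computed forward: suffix-from-i = total - prefix-before-i.'''
--     totP = sum(x for x in S if x > 0)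
--     totN = sum(x for x in S if x <= 0)
--     resPos, resNeg = [], []
--     p = n = 0
--     for x in S:
--         resPos.append(totP - p)
--         resNeg.append(totN - n)
--         if x > 0:
--             p += x
--         else:
--             n += x
--     return resPos, resNeg
-- ===== Notes on version B (the rewrite author's own statement) =====
-- stated objective: alternative
-- what changed: Replaces A's backward while-loop that accumulates suffix sums into preallocated arrays by a forward algorithm: compute the total positive and negative sums once, then one forward pass emitting total minus the running prefix sum before each index (suffix = total - strict prefix).
import Mathlib
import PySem

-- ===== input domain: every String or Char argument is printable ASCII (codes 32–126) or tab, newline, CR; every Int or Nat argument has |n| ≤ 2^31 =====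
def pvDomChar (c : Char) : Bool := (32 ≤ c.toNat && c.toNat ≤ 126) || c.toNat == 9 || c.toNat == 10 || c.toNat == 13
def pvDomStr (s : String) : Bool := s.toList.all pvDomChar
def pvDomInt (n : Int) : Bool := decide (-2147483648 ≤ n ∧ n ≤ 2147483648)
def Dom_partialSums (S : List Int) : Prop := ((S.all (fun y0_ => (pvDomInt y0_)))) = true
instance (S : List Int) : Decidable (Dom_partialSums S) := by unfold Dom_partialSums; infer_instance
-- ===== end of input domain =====

-- B replaces A's backward while-loop by a forward algorithm: totals of positives/negatives
-- computed once, then one forward pass emitting total minus the running strict-prefix sum.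


-- ===== PORT A =====
-- A's while loop: processes index i, then i-1, …, 0, writing into the preallocated arrays.
def partialSumsLoop (S : List Int) (i : Nat) (resPos resNeg : List Int) (pp pn : Int) :
    List Int × List Int :=
  let curr := PySem.List.pyGetD S (i : Int) 0   -- S[i]; always in range when called, 0 never used
  if 0 < curr then
    let resPos' := resPos.set i (pp + curr)
    let resNeg' := resNeg.set i pn
    match i with
    | 0 => (resPos', resNeg')
    | i' + 1 => partialSumsLoop S i' resPos' resNeg' (pp + curr) pn
  else
    let resPos' := resPos.set i pp
    let resNeg' := resNeg.set i (pn + curr)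
    match i with
    | 0 => (resPos', resNeg')
    | i' + 1 => partialSumsLoop S i' resPos' resNeg' pp (pn + curr)

def partialSums (S : List Int) : List Int × List Int :=
  match S.length with
  | 0 => ([], [])        -- Python raises IndexError here; excluded by Pre_partialSums
  | n + 1 =>
    let last := PySem.List.pyGetD S (n : Int) 0   -- S[i] at i = len(S)-1, in range
    let rp0 : Int := if 0 < last then last else 0
    let rn0 : Int := if last < 0 then last else 0
    let resPos := (List.replicate (n + 1) (0 : Int)).set n rp0
    let resNeg := (List.replicate (n + 1) (0 : Int)).set n rn0
    match n with
    | 0 => (resPos, resNeg)                               -- while loop not entered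
    | n' + 1 => partialSumsLoop S n' resPos resNeg rp0 rn0

-- ===== PORT B =====
-- Source B verbatim: totals of positives/negatives, then one forward pass appending
-- total minus the running strict-prefix sums p and n.
def partialSums_alt (S : List Int) : List Int × List Int :=
  let totP := (S.filter (fun x => decide (0 < x))).sum
  let totN := (S.filter (fun x => decide (x ≤ 0))).sum
  let st := S.foldl
    (fun (st : Int × Int × List Int × List Int) x =>
      let rp := st.2.2.1 ++ [totP - st.1]
      let rn := st.2.2.2 ++ [totN - st.2.1]
      if 0 < x then (st.1 + x, st.2.1, rp, rn)
      else (st.1, st.2.1 + x, rp, rn))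
    (0, 0, [], [])
  (st.2.2.1, st.2.2.2)

-- ===== PRECONDITION & SPEC =====
-- Pre_ excludes only the empty list, on which A raises IndexError (S[-1] on an empty array).
def Pre_partialSums (S : List Int) : Prop := S ≠ []
instance (S : List Int) : Decidable (Pre_partialSums S) := by unfold Pre_partialSums; infer_instance
def pvWitness_partialSums : List Int := [3, -2, 0, 5, -1]

def Spec_partialSums (S : List Int) (out : List Int × List Int) : Prop := out = partialSums_alt S
instance (S : List Int) (out : List Int × List Int) : Decidable (Spec_partialSums S out) := by
  unfold Spec_partialSums; infer_instance

-- ===== CLAIM (what is proved, stated in full; the proofs are below) =====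
def Claim_equal_partialSums : Prop :=
  ∀ (S : List Int), Dom_partialSums S → Pre_partialSums S → Spec_partialSums S (partialSums S)
-- ===== LEMMAS AND PROOFS =====
-- reference value: suffix sums of f-contributions (f = positive part / non-positive part)
def fpos (x : Int) : Int := if 0 < x then x else 0
def fneg (x : Int) : Int := if 0 < x then 0 else x
def sSum (f : Int → Int) (l : List Int) : Int := (l.map f).sum

def suf (f : Int → Int) : List Int → List Int
  | [] => []
  | x :: t => sSum f (x :: t) :: suf f t

theorem sSum_cons (f : Int → Int) (x : Int) (t : List Int) :
    sSum f (x :: t) = f x + sSum f t := by simp [sSum]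

theorem suf_drop (f : Int → Int) (l : List Int) (k : Nat) :
    (suf f l).drop k = suf f (l.drop k) := by
  induction l generalizing k with
  | nil => simp [suf]
  | cons x t ih =>
    cases k with
    | zero => rfl
    | succ k => simpa [suf] using ih k

theorem set_drop_self (l : List Int) (i : Nat) (v : Int) (h : i < l.length) :
    (l.set i v).drop i = v :: l.drop (i + 1) := by
  rw [List.drop_eq_getElem_cons (by simpa using h)]
  simp [List.drop_set]

theorem sSum_drop_succ (f : Int → Int) (S : List Int) (i : Nat) (hi : i < S.length) :
    sSum f (S.drop i) = f S[i] + sSum f (S.drop (i + 1)) := by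
  rw [List.drop_eq_getElem_cons hi, sSum_cons]

-- one write of A's loop preserves "tail from i on agrees with the reference"
theorem step (f : Int → Int) (S resPos : List Int) (i : Nat) (v : Int)
    (hi : i < S.length) (hlp : resPos.length = S.length)
    (hdp : resPos.drop (i + 1) = (suf f S).drop (i + 1))
    (hv : v = sSum f (S.drop i)) :
    (resPos.set i v).drop i = (suf f S).drop i := by
  rw [set_drop_self _ _ _ (hlp ▸ hi), hdp, hv, suf_drop, suf_drop,
    List.drop_eq_getElem_cons hi]
  rfl

-- totals computed by B's filters are the reference totals
theorem filter_pos_sum (S : List Int) :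
    (S.filter (fun x => decide (0 < x))).sum = sSum fpos S := by
  induction S with
  | nil => simp [sSum]
  | cons x t ih =>
    by_cases hx : 0 < x <;> simp [hx, sSum_cons, fpos, ih]

theorem filter_neg_sum (S : List Int) :
    (S.filter (fun x => decide (x ≤ 0))).sum = sSum fneg S := by
  induction S with
  | nil => simp [sSum]
  | cons x t ih =>
    by_cases hx : 0 < x <;>
      simp [show (x ≤ 0) ↔ ¬ 0 < x by omega, hx, sSum_cons, fneg, ih]

-- B's forward fold: with totals consistent with the running prefixes, it appends
-- exactly the suffix sums (suffix = total - strict prefix).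
theorem alt_fold (totP totN : Int) (t : List Int) :
    ∀ (p n : Int) (rp rn : List Int),
    totP = p + sSum fpos t → totN = n + sSum fneg t →
    t.foldl
      (fun (st : Int × Int × List Int × List Int) x =>
        let rp := st.2.2.1 ++ [totP - st.1]
        let rn := st.2.2.2 ++ [totN - st.2.1]
        if 0 < x then (st.1 + x, st.2.1, rp, rn)
        else (st.1, st.2.1 + x, rp, rn))
      (p, n, rp, rn) =
    (totP, totN, rp ++ suf fpos t, rn ++ suf fneg t) := by
  induction t with
  | nil =>
    intro p n rp rn hp hn
    simp [suf, sSum] at hp hn ⊢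
    omega
  | cons x u ih =>
    intro p n rp rn hp hn
    have hvp : totP - p = sSum fpos (x :: u) := by omega
    have hvn : totN - n = sSum fneg (x :: u) := by omega
    by_cases hx : 0 < x
    · simp only [List.foldl_cons, hx, if_pos]
      have hfp : fpos x = x := by unfold fpos; rw [if_pos hx]
      have hfn : fneg x = 0 := by unfold fneg; rw [if_pos hx]
      have hp' : totP = (p + x) + sSum fpos u := by
        rw [sSum_cons, hfp] at hp; omega
      have hn' : totN = n + sSum fneg u := by
        rw [sSum_cons, hfn] at hn; omega
      rw [ih (p + x) n _ _ hp' hn', hvp, hvn]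
      simp [suf, sSum_cons]
    · simp only [List.foldl_cons, hx, ite_false]
      have hfp : fpos x = 0 := by unfold fpos; rw [if_neg hx]
      have hfn : fneg x = x := by unfold fneg; rw [if_neg hx]
      have hp' : totP = p + sSum fpos u := by
        rw [sSum_cons, hfp] at hp; omega
      have hn' : totN = (n + x) + sSum fneg u := by
        rw [sSum_cons, hfn] at hn; omega
      rw [ih p (n + x) _ _ hp' hn', hvp, hvn]
      simp [suf, sSum_cons]

theorem alt_eq (S : List Int) : partialSums_alt S = (suf fpos S, suf fneg S) := by
  unfold partialSums_alt
  simp only [filter_pos_sum, filter_neg_sum,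
    alt_fold (sSum fpos S) (sSum fneg S) S 0 0 [] [] (by ring) (by ring), List.nil_append]

-- A's loop invariant: below i everything will still be written; from i+1 on it already
-- matches the reference, and pp/pn are the running suffix sums
theorem loopA_spec (i : Nat) (S resPos resNeg : List Int) (pp pn : Int)
    (hi : i < S.length)
    (hlp : resPos.length = S.length) (hln : resNeg.length = S.length)
    (hdp : resPos.drop (i + 1) = (suf fpos S).drop (i + 1))
    (hdn : resNeg.drop (i + 1) = (suf fneg S).drop (i + 1))
    (hpp : pp = sSum fpos (S.drop (i + 1))) (hpn : pn = sSum fneg (S.drop (i + 1))) :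
    partialSumsLoop S i resPos resNeg pp pn = (suf fpos S, suf fneg S) := by
  induction i generalizing resPos resNeg pp pn with
  | zero =>
    have hget : PySem.List.pyGetD S (0 : Int) 0 = S[0] := by
      have := PySem.List.pyGetD_ofNat S 0 0 hi
      simpa using this
    have hp := step fpos S resPos 0 _ hi hlp hdp rfl
    have hn := step fneg S resNeg 0 _ hi hln hdn rfl
    have hsp := sSum_drop_succ fpos S 0 hi
    have hsn := sSum_drop_succ fneg S 0 hi
    simp only [List.drop_zero] at hp hn hsp hsn
    by_cases hc : (0 : Int) < S[0]
    · have e1 : pp + S[0] = sSum fpos S := by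
        rw [hsp, hpp]; unfold fpos; rw [if_pos hc]; ring
      have e2 : pn = sSum fneg S := by
        rw [hsn, hpn]; unfold fneg; rw [if_pos hc]; ring
      simp only [partialSumsLoop, Nat.cast_zero, hget, hc, if_pos]
      rw [e1, e2, hp, hn]
    · have e1 : pp = sSum fpos S := by
        rw [hsp, hpp]; unfold fpos; rw [if_neg hc]; ring
      have e2 : pn + S[0] = sSum fneg S := by
        rw [hsn, hpn]; unfold fneg; rw [if_neg hc]; ring
      simp only [partialSumsLoop, Nat.cast_zero, hget, hc, ite_false]
      rw [e1, e2, hp, hn]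
  | succ i' ih =>
    have hi' : i' < S.length := by omega
    have hget : PySem.List.pyGetD S ((i' + 1 : Nat) : Int) 0 = S[i' + 1] :=
      PySem.List.pyGetD_ofNat S (i' + 1) 0 hi
    have hp := step fpos S resPos (i' + 1) _ hi hlp hdp rfl
    have hn := step fneg S resNeg (i' + 1) _ hi hln hdn rfl
    have hsp := sSum_drop_succ fpos S (i' + 1) hi
    have hsn := sSum_drop_succ fneg S (i' + 1) hi
    by_cases hc : (0 : Int) < S[i' + 1]
    · have e1 : pp + S[i' + 1] = sSum fpos (S.drop (i' + 1)) := by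
        rw [hsp, hpp]; unfold fpos; rw [if_pos hc]; ring
      have e2 : pn = sSum fneg (S.drop (i' + 1)) := by
        rw [hsn, hpn]; unfold fneg; rw [if_pos hc]; ring
      rw [partialSumsLoop]
      simp only [hget, hc, if_pos]
      rw [e1, e2]
      exact ih _ _ _ _ hi' (by simp [hlp]) (by simp [hln]) hp hn rfl rfl
    · have e1 : pp = sSum fpos (S.drop (i' + 1)) := by
        rw [hsp, hpp]; unfold fpos; rw [if_neg hc]; ring
      have e2 : pn + S[i' + 1] = sSum fneg (S.drop (i' + 1)) := by
        rw [hsn, hpn]; unfold fneg; rw [if_neg hc]; ring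
      rw [partialSumsLoop]
      simp only [hget, hc, ite_false]
      rw [e1, e2]
      exact ih _ _ _ _ hi' (by simp [hlp]) (by simp [hln]) hp hn rfl rfl

theorem a_eq (S : List Int) (h : S ≠ []) : partialSums S = (suf fpos S, suf fneg S) := by
  match S with
  | [x] =>
    have hg : PySem.List.pyGetD [x] ((0 : Nat) : Int) 0 = x :=
      PySem.List.pyGetD_ofNat [x] 0 0 (by simp)
    have hred : partialSums [x] =
        ([(if 0 < x then x else 0)], [(if x < 0 then x else 0)]) := by
      have : partialSums [x] =
          ((List.replicate 1 (0 : Int)).set 0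
              (if 0 < PySem.List.pyGetD [x] ((0 : Nat) : Int) 0 then
                PySem.List.pyGetD [x] ((0 : Nat) : Int) 0 else 0),
            (List.replicate 1 (0 : Int)).set 0
              (if PySem.List.pyGetD [x] ((0 : Nat) : Int) 0 < 0 then
                PySem.List.pyGetD [x] ((0 : Nat) : Int) 0 else 0)) := rfl
      rw [this, hg]
      rfl
    rw [hred]
    simp only [suf, sSum, List.map_cons, List.map_nil, List.sum_cons, List.sum_nil, add_zero]
    unfold fpos fneg
    split_ifs <;> simp <;> omega
  | x :: y :: u =>
    have hiN : u.length + 1 < (x :: y :: u).length := by simp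
    have hg : PySem.List.pyGetD (x :: y :: u) ((u.length + 1 : Nat) : Int) 0
        = (x :: y :: u)[u.length + 1] :=
      PySem.List.pyGetD_ofNat _ _ 0 hiN
    have hred : partialSums (x :: y :: u) =
        partialSumsLoop (x :: y :: u) u.length
          ((List.replicate (u.length + 1 + 1) (0 : Int)).set (u.length + 1)
            (if 0 < PySem.List.pyGetD (x :: y :: u) ((u.length + 1 : Nat) : Int) 0 then
              PySem.List.pyGetD (x :: y :: u) ((u.length + 1 : Nat) : Int) 0 else 0))
          ((List.replicate (u.length + 1 + 1) (0 : Int)).set (u.length + 1)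
            (if PySem.List.pyGetD (x :: y :: u) ((u.length + 1 : Nat) : Int) 0 < 0 then
              PySem.List.pyGetD (x :: y :: u) ((u.length + 1 : Nat) : Int) 0 else 0))
          (if 0 < PySem.List.pyGetD (x :: y :: u) ((u.length + 1 : Nat) : Int) 0 then
            PySem.List.pyGetD (x :: y :: u) ((u.length + 1 : Nat) : Int) 0 else 0)
          (if PySem.List.pyGetD (x :: y :: u) ((u.length + 1 : Nat) : Int) 0 < 0 then
            PySem.List.pyGetD (x :: y :: u) ((u.length + 1 : Nat) : Int) 0 else 0) := rfl
    rw [hred, hg]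
    have hdropS : (x :: y :: u).drop (u.length + 1) = [(x :: y :: u)[u.length + 1]] := by
      rw [List.drop_eq_getElem_cons hiN]
      simp
    apply loopA_spec
    case hi => simp
    case hlp => simp
    case hln => simp
    case hdp =>
      rw [set_drop_self _ _ _ (by simp), suf_drop, hdropS]
      simp [suf, sSum, fpos]
    case hdn =>
      rw [set_drop_self _ _ _ (by simp), suf_drop, hdropS]
      simp only [suf, sSum, List.map_cons, List.map_nil, List.sum_cons, List.sum_nil, add_zero]
      have : (List.replicate (u.length + 1 + 1) (0 : Int)).drop (u.length + 1 + 1) = [] := by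
        simp
      rw [this]
      simp only [List.getElem_cons_succ]
      unfold fneg
      split_ifs <;> simp <;> omega
    case hpp =>
      rw [hdropS]
      simp [sSum, fpos]
    case hpn =>
      rw [hdropS]
      simp only [sSum, List.map_cons, List.map_nil, List.sum_cons, List.sum_nil, add_zero,
        List.getElem_cons_succ]
      unfold fneg
      split_ifs <;> omega

-- ===== VERDICT (by name: the statement is the Claim_ definition above) =====
theorem partialSums_spec : Claim_equal_partialSums := by
  intro S _ hpre
  unfold Spec_partialSums
  rw [a_eq S hpre, alt_eq]
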